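-- pv_equiv track=rewrite | github.com/JoelYYoung/SSE-Assessment | utils/assess-single-testcase.py | merge_as_highest_level
-- ===== SOURCE A (Python) =====
-- def merge_as_highest_level(res_list):
--     loc_status_map = {}
--     for res in res_list:
--         loc = (res[0], res[1])
--         if loc in loc_status_map:
--             loc_status_map[loc] = max(res[2], loc_status_map[loc])
--         else:
--             loc_status_map[loc] = res[2]
--     return loc_status_map
-- ===== SOURCE B (Python) =====
-- def merge_as_highest_level(res_list):
--     locs = dict.fromkeys((r[0], r[1]) for r in res_list)
--     return {loc: max(r[2] for r in res_list if (r[0], r[1]) == loc)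
--             for loc in locs}
-- ===== Notes on version B (the rewrite author's own statement) =====
-- stated objective: alternative
-- what changed: Replaces A's single-pass dict fold with a running max per key by a dict-free two-stage scan: dedup the locations in first-occurrence order, then for each location rescan the whole list and take the max of its statuses.
import Mathlib
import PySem

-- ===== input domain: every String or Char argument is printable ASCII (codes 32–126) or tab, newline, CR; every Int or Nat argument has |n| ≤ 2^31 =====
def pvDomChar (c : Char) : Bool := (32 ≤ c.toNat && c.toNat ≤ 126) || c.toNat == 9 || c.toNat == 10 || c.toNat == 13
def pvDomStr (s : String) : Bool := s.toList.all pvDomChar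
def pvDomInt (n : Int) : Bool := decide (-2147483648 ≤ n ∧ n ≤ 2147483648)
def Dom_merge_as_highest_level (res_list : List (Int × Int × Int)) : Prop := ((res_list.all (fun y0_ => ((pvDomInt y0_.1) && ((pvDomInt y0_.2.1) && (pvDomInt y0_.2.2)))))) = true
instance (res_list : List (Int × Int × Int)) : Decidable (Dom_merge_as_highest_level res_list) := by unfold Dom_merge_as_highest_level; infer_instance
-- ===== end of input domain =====

-- B replaces A's single-pass dict fold keeping a running max with a dict-free two-stage scan
-- (dedup locations in first-occurrence order, then max over a rescan per location): an alternative, not faster.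


-- ===== PORT A =====
-- The returned dict {(x,y): status} is rendered as the triple list in insertion order;
-- 'loc_status_map[loc]' under the 'loc in loc_status_map' guard is ported as getD with an unused default 0.
def merge_as_highest_level (res_list : List (Int × Int × Int)) : List (Int × Int × Int) :=
  (res_list.foldl (fun loc_status_map res =>
      let loc := (res.1, res.2.1)
      if loc_status_map.contains loc then
        loc_status_map.insert loc (max res.2.2 (loc_status_map.getD loc 0))
      else
        loc_status_map.insert loc res.2.2)
    PySem.Dict.empty).items.map (fun p => (p.1.1, p.1.2, p.2))

-- ===== PORT B =====
-- dict.fromkeys(locations) is PySem.List.dedup (first occurrences, in order);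
-- max(...) over the (always nonempty) matching statuses is PySem.List.maxD with an unused default 0.
def merge_as_highest_level_alt (res_list : List (Int × Int × Int)) : List (Int × Int × Int) :=
  let locs := PySem.List.dedup (res_list.map (fun r => (r.1, r.2.1)))
  locs.map (fun loc =>
    (loc.1, loc.2,
     PySem.List.maxD ((res_list.filter (fun r => (r.1, r.2.1) == loc)).map (fun r => r.2.2)) id 0))

-- ===== PRECONDITION & SPEC =====
def Spec_merge_as_highest_level (res_list : List (Int × Int × Int)) (out : List (Int × Int × Int)) : Prop := out = merge_as_highest_level_alt res_list
instance (res_list : List (Int × Int × Int)) (out : List (Int × Int × Int)) : Decidable (Spec_merge_as_highest_level res_list out) := by unfold Spec_merge_as_highest_level; infer_instance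

-- ===== CLAIM (what is proved, stated in full; the proofs are below) =====
def Claim_equal_merge_as_highest_level : Prop := ∀ (res_list : List (Int × Int × Int)), Dom_merge_as_highest_level res_list → Spec_merge_as_highest_level res_list (merge_as_highest_level res_list)

-- ===== LEMMAS AND PROOFS =====

-- the (location, status) pair of a result triple
def pvToPair (r : Int × Int × Int) : (Int × Int) × Int := ((r.1, r.2.1), r.2.2)

-- A's per-step new value for the key p.1
def pvValA (d : PySem.Dict (Int × Int) Int) (p : (Int × Int) × Int) : Int :=
  if d.contains p.1 then max p.2 (d.getD p.1 0) else p.2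

-- Python max folded over an optional running maximum
def pvOmax (o : Option Int) (v : Int) : Option Int := some (o.elim v (fun w => max v w))

-- a dict with nodup keys is its key list paired with its values
theorem pv_items_eq_keys_map {κ ν : Type} [BEq κ] [LawfulBEq κ] (d : PySem.Dict κ ν)
    (h : d.keys.Nodup) (d0 : ν) : d.items = d.keys.map (fun k => (k, d.getD k d0)) := by
  have h1 : d.keys.map (fun k => (k, d.getD k d0)) = d.items.map (fun p => (p.1, d.getD p.1 d0)) := by
    simp only [PySem.Dict.keys, List.map_map]; rfl
  rw [h1]
  have h2 : ∀ p ∈ d.items, (p.1, d.getD p.1 d0) = p := by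
    intro p hp
    have := PySem.Dict.getD_of_mem_items (k := p.1) (v := p.2) (d := d) (d0 := d0) hp h
    simp [this]
  rw [List.map_congr_left h2]; simp

-- A's fold, rewritten over location/status pairs
theorem pv_foldA_eq (l : List (Int × Int × Int)) (d : PySem.Dict (Int × Int) Int) :
    l.foldl (fun loc_status_map res =>
      let loc := (res.1, res.2.1)
      if loc_status_map.contains loc then
        loc_status_map.insert loc (max res.2.2 (loc_status_map.getD loc 0))
      else
        loc_status_map.insert loc res.2.2) d
    = (l.map pvToPair).foldl (fun d p => d.insert p.1 (pvValA d p)) d := by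
  rw [List.foldl_map]
  congr 1
  funext d r
  by_cases h : d.contains (r.1, r.2.1) <;> simp [pvToPair, pvValA, h]

-- lookup after A's fold: the running max of all statuses filed under that key
theorem pv_get?_foldA (pl : List ((Int × Int) × Int)) (d : PySem.Dict (Int × Int) Int)
    (k : Int × Int) :
    ((pl.foldl (fun d p => d.insert p.1 (pvValA d p)) d).get? k)
      = ((pl.filter (fun p => p.1 == k)).map (fun p => p.2)).foldl pvOmax (d.get? k) := by
  induction pl generalizing d with
  | nil => rfl
  | cons p pl ih =>
    by_cases hk : p.1 = k
    · have hstep : ((d.insert p.1 (pvValA d p)).get? k) = pvOmax (d.get? k) p.2 := by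
        rw [PySem.Dict.get?_insert]
        cases hg : d.get? k with
        | none =>
          have hc : d.contains k = false := by
            rw [PySem.Dict.contains_eq_isSome_get?, hg]; rfl
          simp [pvValA, pvOmax, hk, hc]
        | some v =>
          have hc : d.contains k = true := by
            rw [PySem.Dict.contains_eq_isSome_get?, hg]; rfl
          have hgd : d.getD k 0 = v := PySem.Dict.getD_of_get?_eq_some d 0 hg
          simp [pvValA, pvOmax, hk, hc, hgd]
      simp only [List.foldl_cons, List.filter_cons]
      rw [if_pos (by simp [hk]), List.map_cons, List.foldl_cons, ih, hstep]
    · have hstep : ((d.insert p.1 (pvValA d p)).get? k) = d.get? k := by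
        rw [PySem.Dict.get?_insert, if_neg (fun h => hk h.symm)]
      simp only [List.foldl_cons, List.filter_cons]
      rw [if_neg (by simp [hk]), ih, hstep]

-- the optional-running-max fold IS Python's max?
theorem pv_foldl_omax_eq_max? (vs : List Int) :
    vs.foldl pvOmax none = PySem.List.max? vs id := by
  unfold PySem.List.max?
  congr 1
  funext o v
  cases o with
  | none => rfl
  | some m =>
    simp only [pvOmax, Option.elim, id]
    split_ifs with h <;> simp only [Option.some.injEq] <;> omega

-- ===== VERDICT (by name: the statement is the Claim_ definition above) =====
theorem merge_as_highest_level_spec : Claim_equal_merge_as_highest_level := by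
  intro l _
  unfold Spec_merge_as_highest_level merge_as_highest_level merge_as_highest_level_alt
  rw [pv_foldA_eq]
  set pl := l.map pvToPair with hpl
  set dA := pl.foldl (fun d p => d.insert p.1 (pvValA d p)) PySem.Dict.empty with hdA
  have hKA : dA.keys = PySem.Set.update PySem.Dict.empty.keys (pl.map (fun p => p.1)) :=
    PySem.Dict.keys_foldl_insert_key pl (fun p => p.1) pvValA PySem.Dict.empty
  have hnodupE : (PySem.Dict.empty : PySem.Dict (Int × Int) Int).keys.Nodup := by
    rw [PySem.Dict.keys_empty]; exact List.nodup_nil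
  have hnA : dA.keys.Nodup :=
    PySem.Dict.nodup_keys_foldl_insert_key pl (fun p => p.1) pvValA PySem.Dict.empty hnodupE
  have hlocs : PySem.List.dedup (l.map (fun r => (r.1, r.2.1))) = dA.keys := by
    rw [hKA, PySem.List.dedup_eq_ofList, PySem.Dict.keys_empty]
    have : pl.map (fun p => p.1) = l.map (fun r => (r.1, r.2.1)) := by
      rw [hpl, List.map_map]; rfl
    rw [this, PySem.Set.ofList_eq_foldl]; rfl
  rw [pv_items_eq_keys_map dA hnA 0, hlocs]
  simp only [List.map_map]
  apply List.map_congr_left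
  intro k _
  have hvA : dA.getD k 0 = PySem.List.maxD ((pl.filter (fun p => p.1 == k)).map (fun p => p.2)) id 0 := by
    rw [PySem.Dict.getD_eq_get?_getD, hdA, pv_get?_foldA, PySem.Dict.get?_empty,
        pv_foldl_omax_eq_max?]
    rfl
  have hfil : ((l.filter (fun r => (r.1, r.2.1) == k)).map (fun r => r.2.2))
      = (pl.filter (fun p => p.1 == k)).map (fun p => p.2) := by
    rw [hpl, List.filter_map, List.map_map]; rfl
  simp [Function.comp, hvA, hfil]
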